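-- pv_equiv track=rewrite | github.com/jonnyvector/adaptapedia | backend/ingestion/openlibrary.py | extract_primary_genre
-- ===== SOURCE A (Python) =====
-- STANDARD_GENRES = {
--     'Fiction': ['fiction', 'novels', 'literature'],
--     'Science Fiction': ['science fiction', 'sci-fi', 'scifi', 'science-fiction'],
--     'Fantasy': ['fantasy', 'magic', 'sword and sorcery'],
--     'Mystery': ['mystery', 'detective', 'crime fiction', 'whodunit', 'thriller'],
--     'Thriller': ['thriller', 'suspense', 'psychological thriller'],
--     'Horror': ['horror', 'ghost stories', 'supernatural'],
--     'Romance': ['romance', 'love stories', 'romantic fiction'],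
--     'Historical Fiction': ['historical fiction', 'historical novel'],
--     'Adventure': ['adventure', 'action and adventure'],
--     'Young Adult': ['young adult', 'ya', 'teen', 'juvenile fiction'],
--     'Children\'s Literature': ['children\'s fiction', 'juvenile literature', 'children\'s literature', 'children\'s books'],
--     'Drama': ['drama', 'plays', 'theatrical productions'],
--     'Comedy': ['comedy', 'humor', 'humorous stories'],
--     'Dystopian': ['dystopian', 'dystopia', 'post-apocalyptic'],
--     'Biography': ['biography', 'autobiography', 'memoir'],
--     'Non-Fiction': ['non-fiction', 'nonfiction'],
--     'Graphic Novel': ['graphic novels', 'comic books', 'comics', 'manga'],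
--     'Poetry': ['poetry', 'poems', 'verse'],
--     'Short Stories': ['short stories', 'short fiction'],
--     'Classic Literature': ['classic', 'classics', 'literary fiction'],
-- }
--
-- IGNORE_SUBJECTS = {
--     'accessible book', 'protected daisy', 'in library', 'lending library',
--     'open library staff picks', 'new york times bestseller', 'award',
--     'series:', 'fiction, general', 'fiction, ', 'reading level-grade',
--     'internet archive wishlist', 'browsing:', 'subject:',
-- }
--
-- def extract_primary_genre(subjects: list) -> str:
--     """
--     Extract the most appropriate genre from Open Library subjects.
--
--     Algorithm:
--     1. Filter out non-genre subjects (metadata, series tags, etc.)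
--     2. Map subjects to standard genres using keywords
--     3. Return the first matching standard genre
--     4. If no match, return cleaned first subject
--
--     Args:
--         subjects: List of subject strings from Open Library
--
--     Returns:
--         Standardized genre string (max 100 chars)
--     """
--     if not subjects:
--         return ''
--
--     # Normalize and filter subjects
--     cleaned_subjects = []
--     for subject in subjects:
--         if not isinstance(subject, str):
--             continue
--
--         subject_lower = subject.lower().strip()
--
--         # Skip metadata/non-genre subjects
--         if any(ignore in subject_lower for ignore in IGNORE_SUBJECTS):
--             continue
--
--         # Skip very specific topics (likely not genres)
--         # Heuristic: if it's a single word and not capitalized, might be too specific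
--         words = subject.split()
--         if len(words) == 1 and subject_lower == subject and len(subject) > 15:
--             continue
--
--         cleaned_subjects.append(subject_lower)
--
--     if not cleaned_subjects:
--         return ''
--
--     # Try to match against standard genres
--     for standard_genre, keywords in STANDARD_GENRES.items():
--         for subject in cleaned_subjects:
--             for keyword in keywords:
--                 if keyword in subject:
--                     return standard_genre
--
--     # If no match, return the first cleaned subject (capitalized)
--     # but limit to reasonable length and capitalize properly
--     first_subject = subjects[0][:100] if isinstance(subjects[0], str) else ''
--
--     # Skip if it's clearly not a genre (all lowercase single word)
--     if first_subject.islower() and ' ' not in first_subject: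
--         return ''
--
--     return first_subject
-- ===== SOURCE B (Python) =====
-- STANDARD_GENRES = {
--     'Fiction': ['fiction', 'novels', 'literature'],
--     'Science Fiction': ['science fiction', 'sci-fi', 'scifi', 'science-fiction'],
--     'Fantasy': ['fantasy', 'magic', 'sword and sorcery'],
--     'Mystery': ['mystery', 'detective', 'crime fiction', 'whodunit', 'thriller'],
--     'Thriller': ['thriller', 'suspense', 'psychological thriller'],
--     'Horror': ['horror', 'ghost stories', 'supernatural'],
--     'Romance': ['romance', 'love stories', 'romantic fiction'],
--     'Historical Fiction': ['historical fiction', 'historical novel'],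
--     'Adventure': ['adventure', 'action and adventure'],
--     'Young Adult': ['young adult', 'ya', 'teen', 'juvenile fiction'],
--     'Children\'s Literature': ['children\'s fiction', 'juvenile literature', 'children\'s literature', 'children\'s books'],
--     'Drama': ['drama', 'plays', 'theatrical productions'],
--     'Comedy': ['comedy', 'humor', 'humorous stories'],
--     'Dystopian': ['dystopian', 'dystopia', 'post-apocalyptic'],
--     'Biography': ['biography', 'autobiography', 'memoir'],
--     'Non-Fiction': ['non-fiction', 'nonfiction'],
--     'Graphic Novel': ['graphic novels', 'comic books', 'comics', 'manga'],
--     'Poetry': ['poetry', 'poems', 'verse'],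
--     'Short Stories': ['short stories', 'short fiction'],
--     'Classic Literature': ['classic', 'classics', 'literary fiction'],
-- }
--
-- IGNORE_SUBJECTS = {
--     'accessible book', 'protected daisy', 'in library', 'lending library',
--     'open library staff picks', 'new york times bestseller', 'award',
--     'series:', 'fiction, general', 'fiction, ', 'reading level-grade',
--     'internet archive wishlist', 'browsing:', 'subject:',
-- }
--
-- # Genre names in priority (dict) order, and a flat keyword -> priority-index table.
-- GENRE_NAMES = list(STANDARD_GENRES)
-- KEYWORD_INDEX = [(kw, i)
--                  for i, kws in enumerate(STANDARD_GENRES.values())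
--                  for kw in kws]
--
--
-- def _keep(subject):
--     """Predicate: subject survives the metadata/too-specific filter."""
--     sl = subject.lower().strip()
--     if any(ig in sl for ig in IGNORE_SUBJECTS):
--         return False
--     return not (len(subject.split()) == 1 and sl == subject and len(subject) > 15)
--
--
-- def extract_primary_genre(subjects: list) -> str:
--     if not subjects:
--         return ''
--
--     cleaned = [s.lower().strip() for s in subjects
--                if isinstance(s, str) and _keep(s)]
--     if not cleaned:
--         return ''
--
--     # Subject-major single pass: argmin of the priority index over every
--     # keyword hit, scanning the flat keyword table per subject.
--     best = len(GENRE_NAMES)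
--     for s in cleaned:
--         for kw, i in KEYWORD_INDEX:
--             if i < best and kw in s:
--                 best = i
--     if best < len(GENRE_NAMES):
--         return GENRE_NAMES[best]
--
--     first_subject = subjects[0][:100] if isinstance(subjects[0], str) else ''
--     if first_subject.islower() and ' ' not in first_subject:
--         return ''
--     return first_subject
-- ===== Notes on version B (the rewrite author's own statement) =====
-- stated objective: alternative
-- what changed: A's genre-major triple nested loop with early return is replaced by a subject-major single pass over a flat precomputed keyword->priority-index table maintaining an argmin accumulator (lowest matched priority), then one list-index to get the genre name; the cleaning loop becomes a filter+map comprehension over a keep-predicate.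
import Mathlib
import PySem

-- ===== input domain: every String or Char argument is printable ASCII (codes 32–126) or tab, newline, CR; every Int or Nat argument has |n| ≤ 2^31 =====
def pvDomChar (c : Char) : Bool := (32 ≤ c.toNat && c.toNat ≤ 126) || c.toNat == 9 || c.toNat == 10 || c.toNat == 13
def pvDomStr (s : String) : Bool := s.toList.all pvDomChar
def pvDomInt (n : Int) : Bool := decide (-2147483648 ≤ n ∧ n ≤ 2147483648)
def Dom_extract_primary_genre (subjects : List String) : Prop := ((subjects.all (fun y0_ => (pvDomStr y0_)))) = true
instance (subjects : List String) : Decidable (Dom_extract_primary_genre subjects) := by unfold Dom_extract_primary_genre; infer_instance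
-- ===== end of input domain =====

-- B replaces A's genre-major triple nested loop (early return on the first keyword hit) by a
-- subject-major single pass over a flat keyword→priority-index table with an argmin accumulator,
-- then one index into the genre-name list; cleaning becomes filter+map. Alternative decomposition.

-- ===== PORT A =====
-- STANDARD_GENRES dict: association list in insertion order (only iterated, never keyed)
def pvStandardGenres : List (String × List String) := [
  ("Fiction", ["fiction", "novels", "literature"]),
  ("Science Fiction", ["science fiction", "sci-fi", "scifi", "science-fiction"]),
  ("Fantasy", ["fantasy", "magic", "sword and sorcery"]),
  ("Mystery", ["mystery", "detective", "crime fiction", "whodunit", "thriller"]),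
  ("Thriller", ["thriller", "suspense", "psychological thriller"]),
  ("Horror", ["horror", "ghost stories", "supernatural"]),
  ("Romance", ["romance", "love stories", "romantic fiction"]),
  ("Historical Fiction", ["historical fiction", "historical novel"]),
  ("Adventure", ["adventure", "action and adventure"]),
  ("Young Adult", ["young adult", "ya", "teen", "juvenile fiction"]),
  ("Children's Literature", ["children's fiction", "juvenile literature", "children's literature", "children's books"]),
  ("Drama", ["drama", "plays", "theatrical productions"]),
  ("Comedy", ["comedy", "humor", "humorous stories"]),
  ("Dystopian", ["dystopian", "dystopia", "post-apocalyptic"]),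
  ("Biography", ["biography", "autobiography", "memoir"]),
  ("Non-Fiction", ["non-fiction", "nonfiction"]),
  ("Graphic Novel", ["graphic novels", "comic books", "comics", "manga"]),
  ("Poetry", ["poetry", "poems", "verse"]),
  ("Short Stories", ["short stories", "short fiction"]),
  ("Classic Literature", ["classic", "classics", "literary fiction"])]

-- IGNORE_SUBJECTS set: only used via 'any(ignore in … )', which is iteration-order independent,
-- so a plain list of its distinct elements is an exact port
def pvIgnoreSubjects : List String := [
  "accessible book", "protected daisy", "in library", "lending library",
  "open library staff picks", "new york times bestseller", "award",
  "series:", "fiction, general", "fiction, ", "reading level-grade",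
  "internet archive wishlist", "browsing:", "subject:"]

-- any(ignore in subject_lower for ignore in IGNORE_SUBJECTS)
def pvIgnoreHit (sl : String) : Bool := pvIgnoreSubjects.any (fun ig => PySem.Str.isIn ig sl)

-- len(words) == 1 and subject_lower == subject and len(subject) > 15
def pvTooSpecific (subject sl : String) : Bool :=
  (PySem.Str.split₀ subject).length == 1 && sl == subject && decide (15 < PySem.Str.len subject)

-- s.islower(): at least one cased char and no uppercase one; exact on the ASCII domain
def pvStrIslower (s : String) : Bool :=
  s.toList.any (fun c => PySem.Chars.islower c || PySem.Chars.isupper c) &&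
  s.toList.all (fun c => !PySem.Chars.isupper c)

-- A's cleaning loop: continue on ignore-hit or too-specific single word, else append subject_lower
def pvCleanA : List String → List String
  | [] => []
  | subject :: rest =>
    let sl := PySem.Str.strip (PySem.Str.lower subject)
    if pvIgnoreHit sl then pvCleanA rest
    else if pvTooSpecific subject sl then pvCleanA rest
    else sl :: pvCleanA rest

-- innermost loop: for keyword in keywords: if keyword in subject: return standard_genre
def pvKwLoopA (subject g : String) : List String → Option String
  | [] => none
  | kw :: rest => if PySem.Str.isIn kw subject then some g else pvKwLoopA subject g rest

-- middle loop: for subject in cleaned_subjects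
def pvSubjLoopA (g : String) (kws : List String) : List String → Option String
  | [] => none
  | s :: rest =>
    match pvKwLoopA s g kws with
    | some r => some r
    | none => pvSubjLoopA g kws rest

-- outer loop: for standard_genre, keywords in STANDARD_GENRES.items()
def pvGenreLoopA (cleaned : List String) : List (String × List String) → Option String
  | [] => none
  | (g, kws) :: rest =>
    match pvSubjLoopA g kws cleaned with
    | some r => some r
    | none => pvGenreLoopA cleaned rest

-- body of A after the 'if not subjects' guard (subjects = s0 :: rest)
def pvTailA (s0 : String) (rest : List String) : String :=
  if (pvCleanA (s0 :: rest)).isEmpty then ""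
  else
    match pvGenreLoopA (pvCleanA (s0 :: rest)) pvStandardGenres with
    | some g => g
    | none =>
      let first := PySem.Str.slice s0 none (some 100)   -- subjects[0][:100]
      if pvStrIslower first && !(PySem.Str.isIn " " first) then "" else first

def extract_primary_genre (subjects : List String) : String :=
  match subjects with
  | [] => ""
  | s0 :: rest => pvTailA s0 rest

-- ===== PORT B =====
-- GENRE_NAMES = list(STANDARD_GENRES)
def pvGenreNames : List String := pvStandardGenres.map Prod.fst

-- KEYWORD_INDEX: flat (keyword, priority index) table built by the enumerate comprehension
def pvKW : List (String × Nat) :=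
  pvStandardGenres.zipIdx.flatMap (fun p => p.1.2.map (fun kw => (kw, p.2)))

-- B's _keep predicate
def pvKeepB (subject : String) : Bool :=
  let sl := PySem.Str.strip (PySem.Str.lower subject)
  if pvIgnoreHit sl then false else !(pvTooSpecific subject sl)

def pvCleanB (subjects : List String) : List String :=
  (subjects.filter pvKeepB).map (fun s => PySem.Str.strip (PySem.Str.lower s))

-- the subject-major argmin pass: best = lowest priority index of any keyword hit (init len = miss)
def pvBest (cleaned : List String) : Nat :=
  cleaned.foldl
    (fun b s => pvKW.foldl (fun b p => if p.2 < b && PySem.Str.isIn p.1 s then p.2 else b) b)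
    pvGenreNames.length

-- body of B after the empty guard (subjects = s0 :: rest)
def pvTailB (s0 : String) (rest : List String) : String :=
  if (pvCleanB (s0 :: rest)).isEmpty then ""
  else
    let best := pvBest (pvCleanB (s0 :: rest))
    if best < pvGenreNames.length then pvGenreNames.getD best ""
    else
      let first := PySem.Str.slice s0 none (some 100)
      if pvStrIslower first && !(PySem.Str.isIn " " first) then "" else first

def extract_primary_genre_alt (subjects : List String) : String :=
  match subjects with
  | [] => ""
  | s0 :: rest => pvTailB s0 rest

-- ===== PRECONDITION & SPEC =====
def Spec_extract_primary_genre (subjects : List String) (out : String) : Prop := out = extract_primary_genre_alt subjects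
instance (subjects : List String) (out : String) : Decidable (Spec_extract_primary_genre subjects out) := by unfold Spec_extract_primary_genre; infer_instance

-- ===== CLAIM (what is proved, stated in full; the proofs are below) =====
def Claim_equal_extract_primary_genre : Prop := ∀ (subjects : List String), Dom_extract_primary_genre subjects → Spec_extract_primary_genre subjects (extract_primary_genre subjects)

-- ===== LEMMAS AND PROOFS =====

-- does genre entry p have a keyword hit in some cleaned subject? (A's search predicate)
def pvHit (cleaned : List String) (p : String × List String) : Bool :=
  cleaned.any (fun s => p.2.any (fun kw => PySem.Str.isIn kw s))

-- all priority indices hit by some cleaned subject, subject-major order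
def pvAllIdx (cleaned : List String) : List Nat :=
  cleaned.flatMap (fun s => (pvKW.filter (fun p => PySem.Str.isIn p.1 s)).map Prod.snd)

theorem pvCleanA_eq (xs : List String) : pvCleanA xs = pvCleanB xs := by
  induction xs with
  | nil => rfl
  | cons x rest ih =>
    cases h1 : pvIgnoreHit (PySem.Str.strip (PySem.Str.lower x)) with
    | true => simpa [pvCleanA, pvCleanB, pvKeepB, List.filter_cons, h1] using ih
    | false =>
      cases h2 : pvTooSpecific x (PySem.Str.strip (PySem.Str.lower x)) with
      | true => simpa [pvCleanA, pvCleanB, pvKeepB, List.filter_cons, h1, h2] using ih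
      | false => simpa [pvCleanA, pvCleanB, pvKeepB, List.filter_cons, h1, h2] using ih

theorem pvKwLoopA_eq (s g : String) (kws : List String) :
    pvKwLoopA s g kws = if kws.any (fun kw => PySem.Str.isIn kw s) then some g else none := by
  induction kws with
  | nil => rfl
  | cons kw rest ih =>
    cases h : PySem.Chars.isIn kw.toList s.toList with
    | true => simp [pvKwLoopA, h]
    | false => simp [pvKwLoopA, h, ih]

theorem pvSubjLoopA_eq (g : String) (kws : List String) (cleaned : List String) :
    pvSubjLoopA g kws cleaned = if pvHit cleaned (g, kws) then some g else none := by
  induction cleaned with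
  | nil => rfl
  | cons s rest ih =>
    by_cases h : (∃ x ∈ kws, PySem.Chars.isIn x.toList s.toList = true)
    · simp [pvSubjLoopA, pvKwLoopA_eq, pvHit, h]
    · simp [pvSubjLoopA, pvKwLoopA_eq, pvHit, h] at *
      rw [ih]

theorem pvGenreLoopA_eq (cleaned : List String) (gs : List (String × List String)) :
    pvGenreLoopA cleaned gs = (gs.find? (pvHit cleaned)).map Prod.fst := by
  induction gs with
  | nil => rfl
  | cons p rest ih =>
    obtain ⟨g, kws⟩ := p
    cases h : pvHit cleaned (g, kws) with
    | true => simp [pvGenreLoopA, pvSubjLoopA_eq, List.find?_cons_of_pos, h]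
    | false =>
      rw [List.find?_cons_of_neg (by simp [h])]
      simp [pvGenreLoopA, pvSubjLoopA_eq, h, ih]

-- the guarded-update inner fold is a min-fold over the matched indices
theorem pvInner_eq (s : String) (L : List (String × Nat)) (b : Nat) :
    L.foldl (fun b p => if p.2 < b && PySem.Str.isIn p.1 s then p.2 else b) b
      = ((L.filter (fun p => PySem.Str.isIn p.1 s)).map Prod.snd).foldl min b := by
  induction L generalizing b with
  | nil => rfl
  | cons p L ih =>
    rw [List.foldl_cons, List.filter_cons]
    cases h : PySem.Str.isIn p.1 s with
    | false =>
      simp only [Bool.and_false]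
      rw [if_neg Bool.false_ne_true, if_neg Bool.false_ne_true]
      exact ih b
    | true =>
      simp only [Bool.and_true]
      rw [if_pos trivial]
      have hstep : (if decide (p.2 < b) = true then p.2 else b) = min b p.2 := by
        simp only [decide_eq_true_eq]; split <;> omega
      rw [hstep, List.map_cons, List.foldl_cons, ih]

theorem foldl_min_le (l : List Nat) (b : Nat) : l.foldl min b ≤ b := by
  induction l generalizing b with
  | nil => exact le_refl b
  | cons a l ih => exact le_trans (ih (min b a)) (by omega)

theorem foldl_min_le_of_mem (l : List Nat) (b x : Nat) (hx : x ∈ l) : l.foldl min b ≤ x := by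
  induction l generalizing b with
  | nil => cases hx
  | cons a l ih =>
    rcases List.mem_cons.1 hx with rfl | hx
    · exact le_trans (foldl_min_le l (min b x)) (by omega)
    · exact ih (min b a) hx

theorem foldl_min_mem (l : List Nat) (b : Nat) : l.foldl min b = b ∨ l.foldl min b ∈ l := by
  induction l generalizing b with
  | nil => exact Or.inl rfl
  | cons a l ih =>
    rcases ih (min b a) with h | h
    · by_cases hba : b ≤ a
      · exact Or.inl (by rw [List.foldl_cons, h, min_eq_left hba])
      · exact Or.inr (by
          rw [List.foldl_cons, h, min_eq_right (by omega)]
          exact List.mem_cons_self)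
    · exact Or.inr (List.mem_cons_of_mem _ h)

theorem pvBest_eq (cleaned : List String) : pvBest cleaned = (pvAllIdx cleaned).foldl min 20 := by
  have key : ∀ (cs : List String) (b : Nat),
      cs.foldl (fun b s => pvKW.foldl (fun b p => if p.2 < b && PySem.Str.isIn p.1 s then p.2 else b) b) b
        = (cs.flatMap (fun s => (pvKW.filter (fun p => PySem.Str.isIn p.1 s)).map Prod.snd)).foldl min b := by
    intro cs
    induction cs with
    | nil => intro b; rfl
    | cons s cs ih =>
      intro b
      rw [List.flatMap_cons, List.foldl_append, List.foldl_cons, pvInner_eq, ih]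
  show _ = _
  rw [pvBest, pvAllIdx, key]
  rfl

theorem pv_mem_allIdx (cleaned : List String) (i : Nat) :
    i ∈ pvAllIdx cleaned ↔ ∃ h : i < pvStandardGenres.length, pvHit cleaned pvStandardGenres[i] = true := by
  unfold pvAllIdx pvKW pvHit
  constructor
  · rintro hm
    rcases List.mem_flatMap.1 hm with ⟨s, hs, hmi⟩
    rcases List.mem_map.1 hmi with ⟨p, hpf, rfl⟩
    rcases List.mem_filter.1 hpf with ⟨hpKW, hpin⟩
    rcases List.mem_flatMap.1 hpKW with ⟨q, hq, hpq⟩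
    rcases List.mem_map.1 hpq with ⟨kw, hkw, rfl⟩
    have hq' := List.mem_zipIdx_iff_getElem?.1 hq
    rcases List.getElem?_eq_some_iff.1 hq' with ⟨hlt, hget⟩
    refine ⟨hlt, ?_⟩
    simp only [List.any_eq_true]
    exact ⟨s, hs, by rw [hget]; exact ⟨kw, hkw, hpin⟩⟩
  · rintro ⟨hlt, hhit⟩
    simp only [List.any_eq_true] at hhit
    rcases hhit with ⟨s, hs, kw, hkw, hin⟩
    refine List.mem_flatMap.2 ⟨s, hs, ?_⟩
    refine List.mem_map.2 ⟨(kw, i), ?_, rfl⟩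
    refine List.mem_filter.2 ⟨?_, hin⟩
    refine List.mem_flatMap.2 ⟨(pvStandardGenres[i], i), ?_, ?_⟩
    · exact List.mem_zipIdx_iff_getElem?.2 (by simp [hlt])
    · exact List.mem_map.2 ⟨kw, hkw, rfl⟩

theorem pv_find?_min {α : Type} (G : List α) (p : α → Bool) (M : Nat) (hM : M < G.length)
    (hp : p G[M] = true) (hmin : ∀ j (hj : j < G.length), p G[j] = true → M ≤ j) :
    G.find? p = some G[M] := by
  induction G generalizing M with
  | nil => cases hM
  | cons a t ih =>
    by_cases ha : p a = true
    · have h0 : M = 0 := Nat.le_zero.mp (hmin 0 (by omega) ha)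
      subst h0
      simp [ha]
    · cases M with
      | zero => exact absurd hp ha
      | succ M' =>
        rw [List.find?_cons_of_neg ha]
        have hM' : M' < t.length := by simpa using hM
        have hp' : p t[M'] = true := by simpa using hp
        have hmin' : ∀ j (hj : j < t.length), p t[j] = true → M' ≤ j := by
          intro j hj hpj
          have := hmin (j + 1) (by simpa using Nat.succ_lt_succ hj) (by simpa using hpj)
          omega
        have := ih M' hM' hp' hmin'
        rw [this]
        simp

theorem pvLen20 : pvStandardGenres.length = 20 := by rfl

theorem pvMain_eq (cleaned : List String) :
    pvGenreLoopA cleaned pvStandardGenres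
      = (if pvBest cleaned < pvGenreNames.length then some (pvGenreNames.getD (pvBest cleaned) "") else none) := by
  rw [pvGenreLoopA_eq]
  have hN : pvGenreNames.length = 20 := rfl
  by_cases h : pvBest cleaned < pvGenreNames.length
  · rw [if_pos h]
    have h20 : pvBest cleaned < 20 := by omega
    have hmem : pvBest cleaned ∈ pvAllIdx cleaned := by
      rcases foldl_min_mem (pvAllIdx cleaned) 20 with hEq | hm
      · exfalso; rw [pvBest_eq, hEq] at h20; omega
      · rw [pvBest_eq]; exact hm
    rcases (pv_mem_allIdx cleaned _).1 hmem with ⟨hlt, hhit⟩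
    have hmin : ∀ j (hj : j < pvStandardGenres.length),
        pvHit cleaned pvStandardGenres[j] = true → pvBest cleaned ≤ j := by
      intro j hj hh
      rw [pvBest_eq]
      exact foldl_min_le_of_mem _ 20 j ((pv_mem_allIdx cleaned j).2 ⟨hj, hh⟩)
    rw [pv_find?_min pvStandardGenres (pvHit cleaned) (pvBest cleaned) hlt hhit hmin]
    rw [List.getD_eq_getElem pvGenreNames "" (by omega)]
    simp [pvGenreNames]
  · rw [if_neg h]
    have hnone : pvStandardGenres.find? (pvHit cleaned) = none := by
      rw [List.find?_eq_none]
      intro x hx hpx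
      rcases List.mem_iff_getElem.1 hx with ⟨j, hj, rfl⟩
      have hle := foldl_min_le_of_mem _ 20 j ((pv_mem_allIdx _ j).2 ⟨hj, hpx⟩)
      rw [← pvBest_eq] at hle
      rw [pvLen20] at hj
      omega
    rw [hnone]; rfl

theorem pvTail_eq (s0 : String) (rest : List String) : pvTailA s0 rest = pvTailB s0 rest := by
  unfold pvTailA pvTailB
  rw [pvCleanA_eq, pvMain_eq]
  by_cases hb : pvBest (pvCleanB (s0 :: rest)) < pvGenreNames.length
  · simp [hb]
  · simp [hb]

-- ===== VERDICT (by name: the statement is the Claim_ definition above) =====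
theorem extract_primary_genre_spec : Claim_equal_extract_primary_genre := by
  intro subjects _
  unfold Spec_extract_primary_genre
  match subjects with
  | [] => rfl
  | s0 :: rest => exact pvTail_eq s0 rest
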